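-- pv_equiv track=rewrite | github.com/HoboKristian/KnowITJulekalender2018 | 5/main.py | remove_n
-- ===== SOURCE A (Python) =====
-- def remove_n(option):
--     numbers = [1, 2, 3, 4, 5, 6, 7, 8, 7, 6, 5, 4, 3, 2, 1]
--
--     out_numbers = []
--     out_options = []
--     for o, curr in zip(option, numbers):
--         if o == "n":
--             old = out_numbers[-1]
--             out_numbers[-1] = old * 10 + curr
--         else:
--             out_numbers.append(curr)
--             out_options.append(o)
--     return zip(out_options, out_numbers)
-- ===== SOURCE B (Python) =====
-- def _merge(g):
--     acc = g[0]
--     for d in g[1:]: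
--         acc = acc * 10 + d
--     return acc
--
--
-- def remove_n(option):
--     numbers = [1, 2, 3, 4, 5, 6, 7, 8, 7, 6, 5, 4, 3, 2, 1]
--
--     # First pass: group the digits; a non-'n' option starts a new group,
--     # an 'n' appends its digit to the current (last) group.
--     groups = []
--     out_options = []
--     for o, curr in zip(option, numbers):
--         if o != "n":
--             groups.append([curr])
--             out_options.append(o)
--         else:
--             groups[-1].append(curr)
--
--     # Second pass: fold each digit group into a single number.
--     return zip(out_options, [_merge(g) for g in groups])
-- ===== Notes on version B (the rewrite author's own statement) =====
-- stated objective: alternative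
-- what changed: B does two passes instead of A's fused accumulation: it first groups the digits into lists (new group on a non-'n' option, append on 'n') and then folds each group into a number with a*10+d, instead of maintaining the partly-merged numbers in place.
import Mathlib
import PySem

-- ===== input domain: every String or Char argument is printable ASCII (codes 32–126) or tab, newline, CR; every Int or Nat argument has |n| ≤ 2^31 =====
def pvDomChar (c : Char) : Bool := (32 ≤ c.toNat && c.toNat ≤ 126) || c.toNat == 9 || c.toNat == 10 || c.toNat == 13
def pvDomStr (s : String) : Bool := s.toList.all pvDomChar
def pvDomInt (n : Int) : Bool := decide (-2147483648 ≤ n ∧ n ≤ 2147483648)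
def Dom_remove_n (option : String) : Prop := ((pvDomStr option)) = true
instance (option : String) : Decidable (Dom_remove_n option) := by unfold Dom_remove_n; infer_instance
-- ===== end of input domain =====

-- B replaces A's fused in-place accumulation by two passes (group the digits, then fold
-- each group into a number); equivalence of the RETURN values is proved on Pre_ below.

-- ===== PORT A =====
def pvNumbers : List Int := [1, 2, 3, 4, 5, 6, 7, 8, 7, 6, 5, 4, 3, 2, 1]

-- A's loop over zip(option, numbers), state = (out_numbers, out_options);
-- 'out_numbers[-1] = old * 10 + curr' becomes dropLast ++ [getLast! * 10 + curr]
-- (exact for nonempty out_numbers; Pre_ excludes the IndexError case).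
def remove_n_loop : List (Char × Int) → List Int × List String → List Int × List String
  | [], st => st
  | (o, curr) :: rest, (nums, opts) =>
    if o = 'n' then
      remove_n_loop rest (nums.dropLast ++ [nums.getLast! * 10 + curr], opts)
    else
      remove_n_loop rest (nums ++ [curr], opts ++ [String.mk [o]])

def remove_n (option : String) : List (String × Int) :=
  let st := remove_n_loop (option.toList.zip pvNumbers) ([], [])
  st.2.zip st.1

-- ===== PORT B =====
-- B's first pass: group the digits (new group on non-'n', append to last group on 'n').
def remove_n_alt_group : List (Char × Int) → List (List Int) × List String → List (List Int) × List String
  | [], st => st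
  | (o, curr) :: rest, (groups, opts) =>
    if o ≠ 'n' then
      remove_n_alt_group rest (groups ++ [[curr]], opts ++ [String.mk [o]])
    else
      remove_n_alt_group rest (groups.dropLast ++ [groups.getLast! ++ [curr]], opts)

-- B's second pass: fold one digit group into a number (acc = g[0]; acc = acc*10 + d).
def remove_n_merge (g : List Int) : Int :=
  match g with
  | [] => 0
  | h :: t => t.foldl (fun a d => a * 10 + d) h

def remove_n_alt (option : String) : List (String × Int) :=
  let st := remove_n_alt_group (option.toList.zip pvNumbers) ([], [])
  st.2.zip (st.1.map remove_n_merge)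

-- ===== PRECONDITION & SPEC =====
-- Pre_ excludes exactly the options whose first character is 'n': there both the Python A
-- (out_numbers[-1] on an empty list) and B (groups[-1]) raise IndexError.
def Pre_remove_n (option : String) : Prop := option.toList.head? ≠ some 'n'
instance (option : String) : Decidable (Pre_remove_n option) := by unfold Pre_remove_n; infer_instance
def pvWitness_remove_n : String := "aanbn"

def Spec_remove_n (option : String) (out : List (String × Int)) : Prop := out = remove_n_alt option
instance (option : String) (out : List (String × Int)) : Decidable (Spec_remove_n option out) := by unfold Spec_remove_n; infer_instance

-- ===== CLAIM (what is proved, stated in full; the proofs are below) =====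
def Claim_equal_remove_n : Prop := ∀ (option : String), Dom_remove_n option → Pre_remove_n option → Spec_remove_n option (remove_n option)

-- ===== LEMMAS AND PROOFS =====

lemma remove_n_merge_append (g : List Int) (c : Int) (hg : g ≠ []) :
    remove_n_merge (g ++ [c]) = remove_n_merge g * 10 + c := by
  cases g with
  | nil => exact absurd rfl hg
  | cons h t => simp [remove_n_merge, List.foldl_append]

lemma remove_n_loop_eq :
    ∀ (ps : List (Char × Int)) (groups : List (List Int)) (opts : List String),
      groups ≠ [] → (∀ g ∈ groups, g ≠ []) →
      remove_n_loop ps (groups.map remove_n_merge, opts) =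
        ((remove_n_alt_group ps (groups, opts)).1.map remove_n_merge,
         (remove_n_alt_group ps (groups, opts)).2) := by
  intro ps
  induction ps with
  | nil => intro groups opts _ _; simp [remove_n_loop, remove_n_alt_group]
  | cons p rest ih =>
    obtain ⟨o, curr⟩ := p
    intro groups opts hne hall
    by_cases ho : o = 'n'
    · -- merge into last group
      obtain ⟨gs, glast, rfl⟩ : ∃ gs glast, groups = gs ++ [glast] := by
        rcases List.eq_nil_or_concat groups with h | ⟨gs, g, h⟩
        · exact absurd h hne
        · exact ⟨gs, g, by simpa [List.concat_eq_append] using h⟩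
      have hglast : glast ≠ [] := hall glast (by simp)
      have hstep :
          ((gs ++ [glast]).map remove_n_merge).dropLast ++
            [((gs ++ [glast]).map remove_n_merge).getLast! * 10 + curr] =
          ((gs ++ [glast]).dropLast ++ [(gs ++ [glast]).getLast! ++ [curr]]).map remove_n_merge := by
        simp [remove_n_merge_append glast curr hglast]
      subst ho
      rw [remove_n_loop, remove_n_alt_group, if_pos rfl, if_neg (by simp), hstep]
      exact ih _ _ (by simp) (by
        intro g hg
        rcases List.mem_append.mp hg with h1 | h1
        · rw [List.dropLast_concat] at h1
          exact hall g (List.mem_append.mpr (.inl h1))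
        · simp at h1; subst h1; simp)
    · -- start a new group
      simp only [remove_n_loop, remove_n_alt_group, if_neg ho, if_pos ho]
      have : (groups.map remove_n_merge) ++ [curr] = (groups ++ [[curr]]).map remove_n_merge := by
        simp [remove_n_merge]
      rw [this]
      exact ih _ _ (by simp) (by
        intro g hg
        rcases List.mem_append.mp hg with h1 | h1
        · exact hall g h1
        · simp at h1; subst h1; simp)

-- ===== VERDICT (by name: the statement is the Claim_ definition above) =====
theorem remove_n_spec : Claim_equal_remove_n := by
  intro option _ hpre
  unfold Spec_remove_n remove_n remove_n_alt
  cases hl : option.toList with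
  | nil => simp [remove_n_loop, remove_n_alt_group]
  | cons o t =>
    have ho : o ≠ 'n' := by
      intro h; exact hpre (by rw [hl, h]; rfl)
    rw [show (o :: t).zip pvNumbers =
        (o, (1 : Int)) :: t.zip [2, 3, 4, 5, 6, 7, 8, 7, 6, 5, 4, 3, 2, 1] from rfl]
    simp only [remove_n_loop, remove_n_alt_group, if_neg ho, if_pos ho]
    have h := remove_n_loop_eq (t.zip [2, 3, 4, 5, 6, 7, 8, 7, 6, 5, 4, 3, 2, 1])
        [[1]] [String.mk [o]] (by simp) (by simp)
    simp only [List.map, remove_n_merge, List.foldl] at h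
    simp [h]
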